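-- pv_equiv track=rewrite | github.com/mysticaltech/universal-context | universal_context/daemon/processors/memory.py | _build_summary_evidence
-- ===== SOURCE A (Python) =====
-- from typing import Any
--
-- MAX_SUMMARY_EVIDENCE_ROWS = 16
--
-- def _build_summary_evidence(
--     summaries: list[dict[str, Any]],
-- ) -> list[dict[str, str]]:
--     """Convert distillation inputs into compact evidence rows."""
--     dedup: set[tuple[str, str]] = set()
--     evidence: list[dict[str, str]] = []
--
--     for item in summaries:
--         run_id = item.get("run_id")
--         turn_id = item.get("turn_id")
--
--         if run_id:
--             key = ("run_id", str(run_id))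
--             if key not in dedup:
--                 dedup.add(key)
--                 evidence.append({"run_id": str(run_id)})
--                 if len(evidence) >= MAX_SUMMARY_EVIDENCE_ROWS:
--                     break
--
--         if turn_id:
--             key = ("turn_id", str(turn_id))
--             if key not in dedup:
--                 dedup.add(key)
--                 evidence.append({"turn_id": str(turn_id)})
--                 if len(evidence) >= MAX_SUMMARY_EVIDENCE_ROWS:
--                     break
--
--         if len(evidence) >= MAX_SUMMARY_EVIDENCE_ROWS:
--             break
--
--     return evidence
-- ===== SOURCE B (Python) =====
-- MAX_SUMMARY_EVIDENCE_ROWS = 16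
--
-- def _build_summary_evidence(summaries):
--     """Two-phase: flatten all candidate (kind, value) pairs first, then one
--     dedup-and-cap scan over that flat stream."""
--     candidates = []
--     for item in summaries:
--         run_id = item.get("run_id")
--         if run_id:
--             candidates.append(("run_id", str(run_id)))
--         turn_id = item.get("turn_id")
--         if turn_id:
--             candidates.append(("turn_id", str(turn_id)))
--
--     evidence = []
--     seen = set()
--     for key in candidates:
--         if key in seen:
--             continue
--         seen.add(key)
--         evidence.append({key[0]: key[1]})
--         if len(evidence) >= MAX_SUMMARY_EVIDENCE_ROWS:
--             break
--     return evidence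
-- ===== Notes on version B (the rewrite author's own statement) =====
-- stated objective: alternative
-- what changed: Replaced A's single loop with interleaved break points by a two-phase pipeline: first flatten all (kind, value) candidates per item in run-before-turn order, then a separate dedup-and-cap scan over that flat stream.
import Mathlib
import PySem

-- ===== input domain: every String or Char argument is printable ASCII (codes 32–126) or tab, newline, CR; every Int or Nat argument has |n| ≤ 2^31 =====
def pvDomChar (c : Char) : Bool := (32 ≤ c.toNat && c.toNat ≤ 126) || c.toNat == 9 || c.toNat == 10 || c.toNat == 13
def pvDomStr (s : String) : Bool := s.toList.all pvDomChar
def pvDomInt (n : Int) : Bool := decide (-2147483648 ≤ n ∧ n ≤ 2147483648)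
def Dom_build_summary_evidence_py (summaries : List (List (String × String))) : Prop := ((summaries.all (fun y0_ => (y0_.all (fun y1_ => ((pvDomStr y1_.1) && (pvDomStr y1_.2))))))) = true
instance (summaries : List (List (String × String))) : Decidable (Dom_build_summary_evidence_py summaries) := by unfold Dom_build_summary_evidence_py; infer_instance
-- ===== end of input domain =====

-- B restructures A's single loop into a two-phase pipeline (flatten candidates, then one
-- dedup-and-cap scan); 'alternative' objective, same O(n) cost, return value proved equal.


-- ===== PORT A =====
-- item.get(k): values are strings here, so a missing key and "" are both falsy;
-- `(….get? k).getD ""` is exact for the `if run_id:` truthiness test, and str(v) = v.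
def pvGetStr (item : List (String × String)) (k : String) : String :=
  ((PySem.Dict.mk item).get? k).getD ""

-- A's loop: per item, a run_id block then a turn_id block, each appending when unseen and
-- breaking the moment the cap of 16 is reached, plus A's trailing cap check before the next item.
def pvGoA : List (List (String × String)) → PySem.Set (String × String) →
    List (List (String × String)) → List (List (String × String))
  | [], _, evidence => evidence
  | item :: rest, dedup, evidence =>
    let run_id := pvGetStr item "run_id"
    let turn_id := pvGetStr item "turn_id"
    let s1 :=
      if run_id ≠ "" ∧ ¬ PySem.Set.contains dedup ("run_id", run_id) then
        let ev' := evidence ++ [[("run_id", run_id)]]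
        (PySem.Set.add dedup ("run_id", run_id), ev', decide (16 ≤ ev'.length))
      else (dedup, evidence, false)
    if s1.2.2 then s1.2.1
    else
      let s2 :=
        if turn_id ≠ "" ∧ ¬ PySem.Set.contains s1.1 ("turn_id", turn_id) then
          let ev' := s1.2.1 ++ [[("turn_id", turn_id)]]
          (PySem.Set.add s1.1 ("turn_id", turn_id), ev', decide (16 ≤ ev'.length))
        else (s1.1, s1.2.1, false)
      if s2.2.2 then s2.2.1
      else if 16 ≤ s2.2.1.length then s2.2.1
      else pvGoA rest s2.1 s2.2.1

def build_summary_evidence_py (summaries : List (List (String × String))) :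
    List (List (String × String)) :=
  pvGoA summaries PySem.Set.empty []

-- ===== PORT B =====
-- Phase 1 of Source B: the candidates contributed by one item, run_id before turn_id.
def pvCandsOf (item : List (String × String)) : List (String × String) :=
  let run_id := pvGetStr item "run_id"
  let turn_id := pvGetStr item "turn_id"
  (if run_id ≠ "" then [("run_id", run_id)] else []) ++
  (if turn_id ≠ "" then [("turn_id", turn_id)] else [])

-- Phase 2 of Source B: one dedup-and-cap scan over the flat candidate stream.
def pvScanB : List (String × String) → PySem.Set (String × String) →
    List (List (String × String)) → List (List (String × String))
  | [], _, evidence => evidence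
  | key :: rest, seen, evidence =>
    if PySem.Set.contains seen key then pvScanB rest seen evidence
    else
      let ev' := evidence ++ [[(key.1, key.2)]]
      if 16 ≤ ev'.length then ev' else pvScanB rest (PySem.Set.add seen key) ev'

def build_summary_evidence_py_alt (summaries : List (List (String × String))) :
    List (List (String × String)) :=
  pvScanB (summaries.foldl (fun acc item => acc ++ pvCandsOf item) []) PySem.Set.empty []

-- ===== PRECONDITION & SPEC =====
def Spec_build_summary_evidence_py (summaries : List (List (String × String))) (out : List (List (String × String))) : Prop := out = build_summary_evidence_py_alt summaries
instance (summaries : List (List (String × String))) (out : List (List (String × String))) : Decidable (Spec_build_summary_evidence_py summaries out) := by unfold Spec_build_summary_evidence_py; infer_instance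

-- ===== CLAIM (what is proved, stated in full; the proofs are below) =====
def Claim_equal_build_summary_evidence_py : Prop := ∀ (summaries : List (List (String × String))), Dom_build_summary_evidence_py summaries → Spec_build_summary_evidence_py summaries (build_summary_evidence_py summaries)

-- ===== LEMMAS AND PROOFS =====

-- Pair-valued version of pvScanB, also tracking the seen set, for composition.
def pvScanP : List (String × String) → PySem.Set (String × String) →
    List (List (String × String)) →
    PySem.Set (String × String) × List (List (String × String))
  | [], seen, evidence => (seen, evidence)
  | key :: rest, seen, evidence =>
    if PySem.Set.contains seen key then pvScanP rest seen evidence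
    else
      let ev' := evidence ++ [[(key.1, key.2)]]
      if 16 ≤ ev'.length then (PySem.Set.add seen key, ev') else pvScanP rest (PySem.Set.add seen key) ev'

lemma pvScanB_eq_scanP (cs : List (String × String)) (seen : PySem.Set (String × String))
    (ev : List (List (String × String))) : pvScanB cs seen ev = (pvScanP cs seen ev).2 := by
  induction cs generalizing seen ev with
  | nil => rfl
  | cons k rest ih =>
    simp only [pvScanB, pvScanP]
    split_ifs <;> simp [ih]

lemma pvScanP_append (c1 c2 : List (String × String)) (seen : PySem.Set (String × String))
    (ev : List (List (String × String))) (h : ev.length < 16) :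
    pvScanP (c1 ++ c2) seen ev =
      (if 16 ≤ (pvScanP c1 seen ev).2.length then pvScanP c1 seen ev
       else pvScanP c2 (pvScanP c1 seen ev).1 (pvScanP c1 seen ev).2) := by
  induction c1 generalizing seen ev with
  | nil =>
    simp only [List.nil_append, pvScanP]
    rw [if_neg (by omega)]
  | cons k rest ih =>
    simp only [List.cons_append, pvScanP]
    by_cases h1 : PySem.Set.contains seen k
    · simp only [if_pos h1]
      exact ih seen ev h
    · simp only [if_neg h1]
      by_cases h2 : 16 ≤ (ev ++ [[(k.1, k.2)]]).length
      · simp only [if_pos h2]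
      · simp only [if_neg h2]
        exact ih _ _ (by omega)

-- One step of A's loop equals the dedup-and-cap scan over that item's candidates.
lemma pvGoA_cons (item : List (String × String)) (rest : List (List (String × String)))
    (dedup : PySem.Set (String × String)) (ev : List (List (String × String)))
    (h : ev.length < 16) :
    pvGoA (item :: rest) dedup ev =
      (if 16 ≤ (pvScanP (pvCandsOf item) dedup ev).2.length then (pvScanP (pvCandsOf item) dedup ev).2
       else pvGoA rest (pvScanP (pvCandsOf item) dedup ev).1 (pvScanP (pvCandsOf item) dedup ev).2) := by
  by_cases hr : pvGetStr item "run_id" ≠ "" <;>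
  by_cases ht : pvGetStr item "turn_id" ≠ "" <;>
    simp only [pvGoA, pvCandsOf, hr, ht, ite_true, ite_false, ne_eq,
      not_false_eq_true, true_and, false_and, List.nil_append, List.append_nil,
      List.cons_append, pvScanP] <;>
    split_ifs <;> simp_all <;> omega

lemma pvGoA_eq_scanP (l : List (List (String × String)))
    (dedup : PySem.Set (String × String)) (ev : List (List (String × String)))
    (h : ev.length < 16) :
    pvGoA l dedup ev = (pvScanP (l.foldl (fun acc item => acc ++ pvCandsOf item) []) dedup ev).2 := by
  have hflat : ∀ (l : List (List (String × String))),
      l.foldl (fun acc item => acc ++ pvCandsOf item) [] = l.flatMap pvCandsOf := by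
    intro l
    simpa using (PySem.List.foldl_append_eq_flatMap (g := pvCandsOf) (l := l) (acc := []))
  rw [hflat]
  induction l generalizing dedup ev with
  | nil => rfl
  | cons item rest ih =>
    rw [List.flatMap_cons, pvScanP_append _ _ _ _ h, pvGoA_cons _ _ _ _ h]
    split_ifs with hc
    · rfl
    · exact ih _ _ (by omega)

-- ===== VERDICT (by name: the statement is the Claim_ definition above) =====
theorem build_summary_evidence_py_spec : Claim_equal_build_summary_evidence_py := by
  intro summaries _
  unfold Spec_build_summary_evidence_py build_summary_evidence_py build_summary_evidence_py_alt
  rw [pvScanB_eq_scanP, pvGoA_eq_scanP]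
  simp
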